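-- pv_equiv track=rewrite | github.com/sammwaughh/Project-Eulers | problem-61.py | squares_under_m
-- ===== SOURCE A (Python) =====
-- def squares_under_m(m):
--     i = 1
--     is_square = [False] * m
--     t = 1
--     while t < m:
--         is_square[t] = True
--         i += 2
--         t += i
--     return is_square
-- ===== SOURCE B (Python) =====
-- def squares_under_m(m):
--     if m <= 0:
--         return []
--     out = [False]              # run before the first square 1*1
--     j = 1
--     while j * j < m:
--         nxt = min((j + 1) * (j + 1), m)
--         out += [True] + [False] * (nxt - j * j - 1)
--         j += 1
--     return out
-- ===== Notes on version B (the rewrite author's own statement) =====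
-- stated objective: alternative
-- what changed: B builds the result as concatenated runs (a True for each square j*j followed by the False gap up to the next square), instead of A's preallocated [False]*m marked in place via a running-odd accumulator.
import Mathlib
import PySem

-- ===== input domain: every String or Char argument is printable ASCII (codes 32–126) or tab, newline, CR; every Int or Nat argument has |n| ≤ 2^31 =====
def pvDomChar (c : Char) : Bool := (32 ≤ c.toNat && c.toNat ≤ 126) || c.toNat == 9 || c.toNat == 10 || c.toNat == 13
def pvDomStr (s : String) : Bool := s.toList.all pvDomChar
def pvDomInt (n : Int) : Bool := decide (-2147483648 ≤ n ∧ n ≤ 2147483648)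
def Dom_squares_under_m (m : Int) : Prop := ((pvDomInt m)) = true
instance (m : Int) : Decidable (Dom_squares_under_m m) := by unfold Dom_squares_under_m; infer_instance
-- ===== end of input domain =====

-- B builds the result by concatenating runs (one True per square, then the False gap up
-- to the next square) instead of A's in-place marking of a preallocated list: alternative.

-- ===== PORT A =====
-- the while loop: state (i, t, is_square); 1 ≤ i is an invariant of the Python loop,
-- carried only so Lean can see termination ((m - t).toNat decreases).
def pvALoop (m i t : Int) (hi : 1 ≤ i) (xs : List Bool) : List Bool :=
  if _h : t < m then
    pvALoop m (i + 2) (t + (i + 2)) (by omega) (PySem.List.pySetD xs t true)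
  else xs
termination_by (m - t).toNat
decreasing_by omega

def squares_under_m (m : Int) : List Bool :=
  pvALoop m 1 1 (by norm_num) (List.replicate m.toNat false)

-- ===== PORT B =====
-- the while loop: append [True] ++ [False]*(gap) for each square j*j < m; 1 ≤ j is an
-- invariant of the Python loop, carried only for termination.
def pvBLoop (m j : Int) (hj : 1 ≤ j) (out : List Bool) : List Bool :=
  if _h : j * j < m then
    pvBLoop m (j + 1) (by omega)
      (out ++ (true :: List.replicate (min ((j + 1) * (j + 1)) m - j * j - 1).toNat false))
  else out
termination_by (m - j).toNat
decreasing_by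
  have h4 : 0 ≤ 4 * (j * j) - 4 * j + 1 := by nlinarith [mul_self_nonneg (2 * j - 1)]
  omega

def squares_under_m_alt (m : Int) : List Bool :=
  if m ≤ 0 then [] else pvBLoop m 1 (by norm_num) [false]

-- ===== PRECONDITION & SPEC =====
def Spec_squares_under_m (m : Int) (out : List Bool) : Prop := out = squares_under_m_alt m
instance (m : Int) (out : List Bool) : Decidable (Spec_squares_under_m m out) := by unfold Spec_squares_under_m; infer_instance

-- ===== CLAIM (what is proved, stated in full; the proofs are below) =====
def Claim_equal_squares_under_m : Prop := ∀ (m : Int), Dom_squares_under_m m → Spec_squares_under_m m (squares_under_m m)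

-- ===== LEMMAS AND PROOFS =====

-- "k is the square of some integer ≥ j"
def pvIsSqFrom (j k : Int) : Prop := ∃ n : Int, j ≤ n ∧ n * n = k

lemma le_mul_self_int (n : Int) : n ≤ n * n := by
  nlinarith [mul_self_nonneg (n - 1)]

lemma sq_le_sq_int {j n : Int} (hj : 1 ≤ j) (h : j ≤ n) : j * j ≤ n * n := by
  nlinarith

lemma pvIsSqFrom_step {j k : Int} :
    pvIsSqFrom j k ↔ (k = j * j ∨ pvIsSqFrom (j + 1) k) := by
  constructor
  · rintro ⟨n, h1, h2⟩
    rcases eq_or_lt_of_le h1 with he | hlt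
    · exact Or.inl (by rw [← h2, ← he])
    · exact Or.inr ⟨n, by omega, h2⟩
  · rintro (he | ⟨n, h1, h2⟩)
    · exact ⟨j, le_refl _, he.symm⟩
    · exact ⟨n, by omega, h2⟩

lemma pvIsSqFrom_none {j k : Int} (hj : 1 ≤ j) (hk : k < j * j) :
    ¬ pvIsSqFrom j k := by
  rintro ⟨n, h1, h2⟩
  have := sq_le_sq_int hj h1
  omega

lemma pvALoop_length_aux (m : Int) (N : Nat) :
    ∀ i t (hi : 1 ≤ i) xs, (m - t).toNat ≤ N →
      (pvALoop m i t hi xs).length = xs.length := by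
  induction N with
  | zero =>
    intro i t hi xs hN
    rw [pvALoop, dif_neg (by omega)]
  | succ N ih =>
    intro i t hi xs hN
    by_cases hm : t < m
    · rw [pvALoop, dif_pos hm, ih _ _ (by omega) _ (by omega)]
      exact PySem.List.length_pySetD xs t true
    · rw [pvALoop, dif_neg hm]

lemma pvALoop_length (m i t : Int) (hi : 1 ≤ i) (xs : List Bool) :
    (pvALoop m i t hi xs).length = xs.length :=
  pvALoop_length_aux m (m - t).toNat i t hi xs (le_refl _)

-- elementwise characterisation of A's loop: an index k < m ends up true iff it is a
-- square of some n ≥ j or was already true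
lemma pvALoop_get_aux (m : Int) (N : Nat) :
    ∀ j i t (hi : 1 ≤ i) (xs : List Bool) (k : Int),
      (m - t).toNat ≤ N → 1 ≤ j → i = 2 * j - 1 → t = j * j →
      (xs.length : Int) = m → 0 ≤ k → k < m →
      (PySem.List.pyGetD (pvALoop m i t hi xs) k false = true ↔
        pvIsSqFrom j k ∨ PySem.List.pyGetD xs k false = true) := by
  induction N with
  | zero =>
    intro j i t hi xs k hN hj hij htj hlen hk0 hkm
    have hm : ¬ (t < m) := by omega
    rw [pvALoop, dif_neg hm]
    have hns : ¬ pvIsSqFrom j k := pvIsSqFrom_none hj (by omega)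
    tauto
  | succ N ih =>
    intro j i t hi xs k hN hj hij htj hlen hk0 hkm
    by_cases hm : t < m
    · rw [pvALoop, dif_pos hm]
      have ht0 : 0 ≤ t := by nlinarith
      have hrec := ih (j + 1) (i + 2) (t + (i + 2)) (by omega)
        (PySem.List.pySetD xs t true) k
        (by omega) (by omega) (by omega) (by rw [htj, hij]; ring)
        (by rw [PySem.List.length_pySetD]; exact hlen) hk0 hkm
      rw [hrec]
      have hset : PySem.List.pyGetD (PySem.List.pySetD xs t true) k false =
          (if k = t then true else PySem.List.pyGetD xs k false) := by
        have h1 := PySem.List.pyGetD_pySetD_natCast xs t.toNat k.toNat true false (by omega)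
        rw [show ((t.toNat : Int)) = t by omega, show ((k.toNat : Int)) = k by omega] at h1
        rw [h1]
        by_cases h : k = t
        · rw [if_pos (by omega), if_pos h]
        · rw [if_neg (by omega), if_neg h]
      rw [hset, pvIsSqFrom_step (j := j) (k := k)]
      by_cases hkt : k = t
      · rw [if_pos hkt]
        have hkj : k = j * j := by omega
        simp [hkj]
      · rw [if_neg hkt]
        constructor
        · rintro (h | h)
          · exact Or.inl (Or.inr h)
          · exact Or.inr h
        · rintro ((he | h) | h)
          · exact absurd (by omega : k = t) hkt
          · exact Or.inl h
          · exact Or.inr h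
    · rw [pvALoop, dif_neg hm]
      have hns : ¬ pvIsSqFrom j k := pvIsSqFrom_none hj (by omega)
      tauto

-- invariant of B's loop: out covers indices [0, min (j*j) m) and holds exactly the
-- squares of integers in [1, j); the loop result covers [0, m) and holds all squares.
lemma pvBLoop_spec_aux (m : Int) (hm : 1 ≤ m) (N : Nat) :
    ∀ j (hj : 1 ≤ j) (out : List Bool), (m - j).toNat ≤ N →
      (out.length : Int) = min (j * j) m →
      (∀ (k : Nat) (hk : k < out.length),
        (out[k] = true ↔ ∃ n : Int, 1 ≤ n ∧ n < j ∧ n * n = (k : Int))) →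
      ((pvBLoop m j hj out).length : Int) = m ∧
      (∀ (k : Nat) (hk : k < (pvBLoop m j hj out).length),
        ((pvBLoop m j hj out)[k] = true ↔ ∃ n : Int, 1 ≤ n ∧ n * n = (k : Int))) := by
  induction N with
  | zero =>
    intro j hj out hN hlen hinv
    have hjm : m ≤ j := by omega
    have hjj : m ≤ j * j := le_trans hjm (le_mul_self_int j)
    rw [pvBLoop, dif_neg (by omega)]
    have hlm : (out.length : Int) = m := by omega
    refine ⟨hlm, fun k hk => ?_⟩
    rw [hinv k hk]
    constructor
    · rintro ⟨n, h1, _, h3⟩; exact ⟨n, h1, h3⟩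
    · rintro ⟨n, h1, h3⟩
      refine ⟨n, h1, ?_, h3⟩
      by_contra h
      have : j ≤ n := by omega
      have := sq_le_sq_int hj this
      omega
  | succ N ih =>
    intro j hj out hN hlen hinv
    by_cases hc : j * j < m
    · rw [pvBLoop, dif_pos hc]
      have hjm : j < m := by have := le_mul_self_int j; omega
      set c : Nat := (min ((j + 1) * (j + 1)) m - j * j - 1).toNat with hc'
      have hmin1 : j * j + 1 ≤ min ((j + 1) * (j + 1)) m := by
        have : j * j < (j + 1) * (j + 1) := by nlinarith
        omega
      have hcI : (c : Int) = min ((j + 1) * (j + 1)) m - j * j - 1 := by omega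
      have hlen' : ((out ++ (true :: List.replicate c false)).length : Int)
          = min ((j + 1) * (j + 1)) m := by
        simp [List.length_append, List.length_replicate]
        omega
      have hout : (out.length : Int) = j * j := by omega
      apply ih (j + 1) (by omega) _ (by omega) hlen'
      intro k hk
      rcases lt_trichotomy k out.length with hlt | heq | hgt
      · rw [List.getElem_append_left hlt, hinv k hlt]
        constructor
        · rintro ⟨n, h1, h2, h3⟩; exact ⟨n, h1, by omega, h3⟩
        · rintro ⟨n, h1, h2, h3⟩
          refine ⟨n, h1, ?_, h3⟩
          by_contra h
          have hnj : n = j := by omega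
          rw [hnj] at h3
          omega
      · have : (out ++ (true :: List.replicate c false))[k] = true := by
          rw [List.getElem_append_right (by omega)]
          simp [heq]
        rw [this]
        simp only [true_iff]
        exact ⟨j, hj, by omega, by omega⟩
      · have hkl : k - out.length - 1 < c := by
          have := (List.length_append ▸ hk : k < out.length + (true :: List.replicate c false).length)
          simp [List.length_replicate] at this
          omega
        have h2 : (out ++ (true :: List.replicate c false)) = (out ++ [true]) ++ List.replicate c false := by
          simp
        have hfalse : (out ++ (true :: List.replicate c false))[k] = false := by
          rw [List.getElem_of_eq h2, List.getElem_append_right (by simp; omega)]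
          apply List.getElem_replicate
        rw [hfalse]
        refine iff_of_false (by simp) ?_
        rintro ⟨n, h1, h2, h3⟩
        have hn : n ≤ j := by omega
        have := sq_le_sq_int h1 (le_refl n)
        have hsq : n * n ≤ j * j := sq_le_sq_int h1 hn
        -- k > out.length = j*j, but also k < min((j+1)²,m) so k ≤ min-1; n² = k > j² impossible
        omega
    · rw [pvBLoop, dif_neg hc]
      have hlm : (out.length : Int) = m := by omega
      refine ⟨hlm, fun k hk => ?_⟩
      rw [hinv k hk]
      constructor
      · rintro ⟨n, h1, _, h3⟩; exact ⟨n, h1, h3⟩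
      · rintro ⟨n, h1, h3⟩
        refine ⟨n, h1, ?_, h3⟩
        by_contra h
        have : j ≤ n := by omega
        have := sq_le_sq_int hj this
        omega

lemma bool_eq_of_iff {a b : Bool} (h : a = true ↔ b = true) : a = b := by
  cases a <;> cases b <;> simp_all

-- ===== VERDICT (by name: the statement is the Claim_ definition above) =====
theorem squares_under_m_spec : Claim_equal_squares_under_m := by
  intro m _
  unfold Spec_squares_under_m squares_under_m squares_under_m_alt
  by_cases hm : m ≤ 0
  · rw [if_pos hm, pvALoop, dif_neg (by omega)]
    simp [show m.toNat = 0 by omega]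
  · replace hm : 1 ≤ m := by omega
    rw [if_neg (by omega)]
    have hB := pvBLoop_spec_aux m hm (m - 1).toNat 1 (by norm_num) [false]
      (le_refl _) (by simp; omega)
      (by intro k hk
          have hk0 : k = 0 := by simpa using hk
          subst hk0
          simp only [List.getElem_cons_zero]
          constructor
          · intro h; exact absurd h (by simp)
          · rintro ⟨n, h1, h2, _⟩; omega)
    obtain ⟨hBlen, hBget⟩ := hB
    apply List.ext_getElem
    · rw [pvALoop_length, List.length_replicate]; omega
    · intro k h1 h2
      have hklen : k < m.toNat := by
        rw [pvALoop_length, List.length_replicate] at h1; exact h1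
      have hkI0 : (0:Int) ≤ (k:Int) := by omega
      have hkIm : (k:Int) < m := by omega
      have hget := pvALoop_get_aux m (m - 1).toNat 1 1 1 (by norm_num)
        (List.replicate m.toNat false) (k:Int) (le_refl _) (le_refl _)
        (by norm_num) (by norm_num)
        (by rw [List.length_replicate]; omega) hkI0 hkIm
      have hrep : PySem.List.pyGetD (List.replicate m.toNat false) (k:Int) false = false := by
        rw [PySem.List.pyGetD_eq_getElem _ _ hkI0 (by rw [List.length_replicate]; omega)]
        simp
      have hL : (pvALoop m 1 1 (by norm_num) (List.replicate m.toNat false))[k] =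
          PySem.List.pyGetD (pvALoop m 1 1 (by norm_num) (List.replicate m.toNat false))
            (k:Int) false := by
        rw [PySem.List.pyGetD_eq_getElem _ _ hkI0
          (by rw [pvALoop_length, List.length_replicate]; omega)]
        simp
      rw [hL]
      apply bool_eq_of_iff
      rw [hget, hrep, hBget k h2]
      unfold pvIsSqFrom
      simp only [Bool.false_eq_true, or_false]
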